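-- pv_equiv track=rewrite | github.com/Enjef/Algo | 1300 - 1399/1370 - Increasing Decreasing String/1370 - Increasing Decreasing String.py | sortString_hash
-- ===== SOURCE A (Python) =====
-- def sortString_hash(s: str) -> str:  # 85.97% 41.23%
--     out = ''
--     x_map = {}
--     for i in s:
--         if i not in x_map:
--             x_map[i] = 0
--         x_map[i] += 1
--     step = 1
--     count = sum(x_map.values())
--     while count:
--         for char in sorted(x_map)[::step]:
--             if x_map[char]:
--                 x_map[char] -= 1
--                 out += char
--                 count -= 1
--         step = -step
--     return out
-- ===== SOURCE B (Python) =====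
-- def sortString_hash(s: str) -> str:
--     # Give the k-th occurrence of each character the sort key
--     # k*128 + (ord(ch) if k even else 127 - ord(ch)) and sort once:
--     # occurrence index = the zigzag pass the character is emitted in,
--     # ascending code on even passes, descending on odd passes.
--     seen = {}
--     keyed = []
--     for ch in s:
--         j = seen.get(ch, 0)
--         seen[ch] = j + 1
--         o = ord(ch)
--         keyed.append((j * 128 + (o if j % 2 == 0 else 127 - o), ch))
--     keyed.sort(key=lambda e: e[0])
--     return ''.join(ch for _, ch in keyed)
-- ===== Notes on version B (the rewrite author's own statement) =====
-- stated objective: alternative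
-- what changed: Replaces A's zigzag simulation (a while loop that re-sorts the key set each pass and decrements a live counter until a running total hits zero) by a single sort: each occurrence of a character gets its duplicate index j in one pass and the integer key j*128 + (ord on even j, 127-ord on odd j), and one stable sort by that key directly yields the answer.
import Mathlib
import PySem

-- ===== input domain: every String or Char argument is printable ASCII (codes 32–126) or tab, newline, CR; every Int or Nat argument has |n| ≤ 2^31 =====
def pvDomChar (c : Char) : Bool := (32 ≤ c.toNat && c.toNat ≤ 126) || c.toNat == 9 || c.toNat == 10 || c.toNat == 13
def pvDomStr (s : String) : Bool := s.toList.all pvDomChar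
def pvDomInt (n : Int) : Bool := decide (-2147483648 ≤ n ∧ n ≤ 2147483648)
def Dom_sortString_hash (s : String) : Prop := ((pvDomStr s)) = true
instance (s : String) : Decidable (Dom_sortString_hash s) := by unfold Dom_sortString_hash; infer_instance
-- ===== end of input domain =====

-- B replaces A's zigzag simulation (a while loop that re-sorts the keys each pass and
-- decrements a live counter) by a single sort: each occurrence gets the integer key
-- j*128 + (ord on even j, 127-ord on odd j) where j is its duplicate index, and one
-- stable sort by that key produces the answer (objective: alternative algorithm).

-- ===== PORT A =====
-- body of "if x_map[char]: x_map[char] -= 1; out += char; count -= 1" (char is a key of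
-- x_map, so the getD default 0 is never used); out kept as List Char (Lean's String is opaque)
def pvPassStepA (st : PySem.Dict Char Int × List Char × Int) (ch : Char) :
    PySem.Dict Char Int × List Char × Int :=
  if st.1.getD ch 0 ≠ 0 then (st.1.modify ch 0 (· - 1), st.2.1 ++ [ch], st.2.2 - 1) else st

-- the "while count:" loop; fuel is an upper bound on the number of passes: each pass with
-- count ≠ 0 moves at least one character, and the loop runs max-frequency ≤ len(s) passes,
-- so fuel = len(s) reproduces the Python loop exactly (when count reaches 0 both stop)
def pvLoopA : Nat → PySem.Dict Char Int → List Char → Int → Int → List Char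
  | 0, _, out, _, _ => out
  | fuel + 1, m, out, step, count =>
    if count ≠ 0 then
      let ks := PySem.List.sorted m.keys (fun c => c)
      -- sorted(x_map)[::step]: step alternates between 1 and -1, [::1] copies, [::-1] reverses
      let ks := if step = 1 then ks else ks.reverse
      let st := ks.foldl pvPassStepA (m, out, count)
      pvLoopA fuel st.1 st.2.1 (-step) st.2.2
    else out

def sortString_hash (s : String) : String :=
  let x_map := s.toList.foldl
    (fun m i => (if m.contains i then m else m.insert i 0).modify i 0 (· + 1))
    PySem.Dict.empty
  String.ofList (pvLoopA s.toList.length x_map [] 1 x_map.values.sum)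

-- ===== PORT B =====
def sortString_hash_alt (s : String) : String :=
  let st := s.toList.foldl
    (fun (p : PySem.Dict Char Int × List (Int × Char)) ch =>
      let j := p.1.getD ch 0
      let o : Int := (ch.toNat : Int)
      (p.1.insert ch (j + 1),
       p.2 ++ [(j * 128 + (if PySem.Int.mod j 2 = 0 then o else 127 - o), ch)]))
    (PySem.Dict.empty, [])
  String.ofList ((PySem.List.sorted st.2 (fun e => e.1)).map (fun e => e.2))

-- ===== PRECONDITION & SPEC =====
def Spec_sortString_hash (s : String) (out : String) : Prop := out = sortString_hash_alt s
instance (s : String) (out : String) : Decidable (Spec_sortString_hash s out) := by unfold Spec_sortString_hash; infer_instance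

-- ===== CLAIM (what is proved, stated in full; the proofs are below) =====
def Claim_equal_sortString_hash : Prop := ∀ (s : String), Dom_sortString_hash s → Spec_sortString_hash s (sortString_hash s)

-- ===== LEMMAS AND PROOFS =====

-- the sorted distinct characters of cs (what sorted(x_map) computes)
def pvAsc (cs : List Char) : List Char :=
  PySem.List.sorted (PySem.Dict.counter cs).keys (fun c => c)

-- the maximum frequency (proof-side only; neither program computes it explicitly)
def pvMB (cs : List Char) : Int :=
  match PySem.List.max? (PySem.Dict.counter cs).values (fun v => v) with
  | some v => v
  | none => 0

-- the row A's pass at level `level` emits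
def pvRow (cs : List Char) (level : Int) : List Char :=
  (if PySem.Int.mod level 2 = 0 then pvAsc cs else (pvAsc cs).reverse).filter
    (fun ch => decide (level < (PySem.Dict.counter cs).getD ch 0))

-- B's sort key of the j-th occurrence of c
def pvKey (j : Int) (c : Char) : Int :=
  j * 128 + (if PySem.Int.mod j 2 = 0 then (c.toNat : Int) else 127 - (c.toNat : Int))

-- the keyed list B's first loop builds, with g = occurrences already seen
def pvKeyedFrom (g : Char → Int) : List Char → List (Int × Char)
  | [] => []
  | ch :: t => (pvKey (g ch) ch, ch) :: pvKeyedFrom (fun c => if c = ch then g ch + 1 else g c) t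

-- the keyed list in sorted (row-major) order
def pvTarget (cs : List Char) : List (Int × Char) :=
  (PySem.List.pyRange 0 (pvMB cs) 1).flatMap
    (fun r => (pvRow cs r).map (fun c => (pvKey r c, c)))

-- A's counter-building loop body equals the plain Counter step
theorem pvBuildA_step (m : PySem.Dict Char Int) (i : Char) :
    (if m.contains i then m else m.insert i 0).modify i 0 (· + 1) = m.modify i 0 (· + 1) := by
  by_cases h : m.contains i
  · simp [h]
  · simp only [Bool.not_eq_true] at h
    simp [h, PySem.Dict.modify, PySem.Dict.getD_insert_self,
      PySem.Dict.insert_insert_self, PySem.Dict.getD_of_not_contains m 0 h]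

theorem pvBuildA_eq_counter (cs : List Char) :
    cs.foldl (fun m i => (if m.contains i then m else m.insert i 0).modify i 0 (· + 1))
      PySem.Dict.empty = PySem.Dict.counter cs := by
  rw [PySem.List.foldl_congr_mem _ _ (fun d x => d.modify x 0 (· + 1)) _
    (fun acc x _ => pvBuildA_step acc x), PySem.Dict.counter_eq_foldl]

-- one full pass of A's inner for loop, characterised componentwise
theorem pvPass_spec (L : List Char) (hnd : L.Nodup) :
    ∀ (m : PySem.Dict Char Int) (out : List Char) (c : Int),
      (L.foldl pvPassStepA (m, out, c)).2.1
          = out ++ L.filter (fun ch => decide (m.getD ch 0 ≠ 0))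
      ∧ (∀ ch, (L.foldl pvPassStepA (m, out, c)).1.getD ch 0 =
          if ch ∈ L ∧ m.getD ch 0 ≠ 0 then m.getD ch 0 - 1 else m.getD ch 0)
      ∧ (L.foldl pvPassStepA (m, out, c)).1.keys = m.keys
      ∧ (L.foldl pvPassStepA (m, out, c)).2.2
          = c - ((L.filter (fun ch => decide (m.getD ch 0 ≠ 0))).length : Int) := by
  induction L with
  | nil => intro m out c; simp
  | cons a L ih =>
    obtain ⟨ha, hndL⟩ := List.nodup_cons.mp hnd
    intro m out c
    by_cases h : m.getD a 0 ≠ 0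
    · have hcont : m.contains a = true := by
        by_contra hc
        exact h (PySem.Dict.getD_of_not_contains m 0 (Bool.not_eq_true _ ▸ hc))
      have hstep : pvPassStepA (m, out, c) a = (m.modify a 0 (· - 1), out ++ [a], c - 1) := by
        simp [pvPassStepA, h]
      have hgd : ∀ x ∈ L, (m.modify a 0 (· - 1)).getD x 0 = m.getD x 0 := fun x hx =>
        PySem.Dict.getD_modify_of_ne m 0 _ (fun hxa => ha (hxa ▸ hx))
      have hfil : L.filter (fun ch => decide ((m.modify a 0 (· - 1)).getD ch 0 ≠ 0))
          = L.filter (fun ch => decide (m.getD ch 0 ≠ 0)) :=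
        List.filter_congr (fun x hx => by simp [hgd x hx])
      obtain ⟨IH1, IH2, IH3, IH4⟩ := ih hndL (m.modify a 0 (· - 1)) (out ++ [a]) (c - 1)
      rw [List.foldl_cons, hstep]
      refine ⟨?_, ?_, ?_, ?_⟩
      · rw [IH1, hfil, List.filter_cons_of_pos (by simpa using h), List.append_assoc]
        simp
      · intro ch
        rw [IH2 ch]
        by_cases hch : ch = a
        · subst hch
          simp [ha, h, PySem.Dict.getD_modify_self]
        · rw [PySem.Dict.getD_modify_of_ne m 0 _ hch]
          exact if_congr (by simp [hch]) rfl rfl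
      · rw [IH3, PySem.Dict.keys_modify, PySem.Dict.keys_insert_of_contains _ _ hcont]
      · rw [IH4, hfil, List.filter_cons_of_pos (by simpa using h)]
        simp only [List.length_cons]
        push_cast
        ring
    · have hstep : pvPassStepA (m, out, c) a = (m, out, c) := by
        simp [pvPassStepA, h]
      obtain ⟨IH1, IH2, IH3, IH4⟩ := ih hndL m out c
      rw [List.foldl_cons, hstep]
      have h0 : m.getD a 0 = 0 := by omega
      refine ⟨?_, ?_, ?_, ?_⟩
      · rw [IH1, List.filter_cons_of_neg (by simp [h0])]
      · intro ch
        rw [IH2 ch]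
        by_cases hch : ch = a
        · subst hch; simp [h0]
        · exact if_congr (by simp [hch]) rfl rfl
      · exact IH3
      · rw [IH4, List.filter_cons_of_neg (by simp [h0])]

-- decrementing every positive count by one, summed
theorem pvSum_step (l : List Char) (f : Char → Int) (k : Int) :
    (l.map (fun ch => max (f ch - k) 0)).sum
      - ((l.filter (fun ch => decide (k < f ch))).length : Int)
      = (l.map (fun ch => max (f ch - (k + 1)) 0)).sum := by
  induction l with
  | nil => simp
  | cons x t ih =>
    by_cases h : k < f x <;> simp [h, List.sum_cons] <;> omega

-- membership in the sorted key list is membership in cs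
theorem pvMem_asc (cs : List Char) (ch : Char) : ch ∈ pvAsc cs ↔ ch ∈ cs := by
  rw [pvAsc, PySem.List.mem_sorted, PySem.Dict.keys_counter, PySem.Set.mem_ofList]

-- counter values are the counts over the distinct characters
theorem pvValues_counter (cs : List Char) :
    (PySem.Dict.counter cs).values
      = (PySem.Set.ofList cs).map (fun k => ((cs.count k : Nat) : Int)) := by
  show ((PySem.Dict.counter cs).items).map (·.2) = _
  rw [PySem.Dict.items_counter]
  simp

-- every count is bounded by pvMB, and pvMB is 0 or an attained count
theorem pvMB_spec (cs : List Char) :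
    (∀ ch ∈ cs, ((cs.count ch : Nat) : Int) ≤ pvMB cs)
      ∧ (pvMB cs = 0 ∨ ∃ ch ∈ cs, pvMB cs = ((cs.count ch : Nat) : Int)) := by
  rcases h : PySem.List.max? (PySem.Dict.counter cs).values (fun v => v) with _ | v
  · have hv : (PySem.Dict.counter cs).values = [] := (PySem.List.max?_eq_none_iff _ _).mp h
    rw [pvValues_counter] at hv
    have hs : PySem.Set.ofList cs = [] := List.map_eq_nil_iff.mp hv
    constructor
    · intro ch hch
      exact absurd ((PySem.Set.mem_ofList cs ch).mpr hch) (by simp [hs])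
    · left; simp [pvMB, h]
  · have hmem := PySem.List.max?_mem h
    have hmax := PySem.List.max?_isMax h
    rw [pvValues_counter] at hmem
    obtain ⟨k, hk, hkv⟩ := List.mem_map.mp hmem
    have hpv : pvMB cs = v := by simp [pvMB, h]
    constructor
    · intro ch hch
      rw [hpv]
      exact hmax _ (by
        rw [pvValues_counter]
        exact List.mem_map.mpr ⟨ch, (PySem.Set.mem_ofList cs ch).mpr hch, rfl⟩)
    · right; exact ⟨k, (PySem.Set.mem_ofList cs k).mp hk, by rw [hpv, ← hkv]⟩

theorem pvMB_nonneg (cs : List Char) : 0 ≤ pvMB cs := by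
  rcases (pvMB_spec cs).2 with h | ⟨ch, _, h⟩ <;> rw [h] <;> positivity

theorem pvAsc_nodup (cs : List Char) : (pvAsc cs).Nodup :=
  ((PySem.List.sorted_perm (PySem.Dict.counter cs).keys (fun c => c) false).nodup_iff).mpr
    (PySem.Dict.nodup_keys_counter cs)

theorem pvSum_nonneg (l : List Char) (f : Char → Int) (k : Int) :
    0 ≤ (l.map (fun ch => max (f ch - k) 0)).sum :=
  List.sum_nonneg (by intro x hx; obtain ⟨ch, _, rfl⟩ := List.mem_map.mp hx; omega)

theorem pvSum_zero_bound (l : List Char) (f : Char → Int) (k : Int)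
    (h : (l.map (fun ch => max (f ch - k) 0)).sum = 0) : ∀ ch ∈ l, f ch ≤ k := by
  induction l with
  | nil => simp
  | cons a t ih =>
    have ht := pvSum_nonneg t f k
    rw [List.map_cons, List.sum_cons] at h
    intro ch hch
    rcases List.mem_cons.mp hch with rfl | hmem
    · omega
    · exact ih (by omega) ch hmem

theorem pvSum_ne_zero_exists (l : List Char) (f : Char → Int) (k : Int)
    (h : (l.map (fun ch => max (f ch - k) 0)).sum ≠ 0) : ∃ ch ∈ l, k < f ch := by
  by_contra hno
  exact h (List.sum_eq_zero (by
    intro x hx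
    obtain ⟨ch, hch, rfl⟩ := List.mem_map.mp hx
    have : ¬ k < f ch := fun hlt => hno ⟨ch, hch, hlt⟩
    omega))

-- A's while loop, run from level k with the invariant state, produces the rows k..m-1
theorem pvLoopA_spec (cs : List Char) :
    ∀ (fuel k : Nat) (m : PySem.Dict Char Int) (out : List Char),
      m.keys = (PySem.Dict.counter cs).keys →
      (∀ ch, m.getD ch 0 = max (((cs.count ch : Nat) : Int) - k) 0) →
      (pvMB cs).toNat ≤ fuel + k →
      pvLoopA fuel m out (if k % 2 = 0 then 1 else -1)
          ((pvAsc cs).map (fun ch => max (((cs.count ch : Nat) : Int) - k) 0)).sum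
        = out ++ (PySem.List.pyRange k (pvMB cs) 1).flatMap (pvRow cs) := by
  have hnn := pvMB_nonneg cs
  intro fuel
  induction fuel with
  | zero =>
    intro k m out _ _ hfuel
    rw [pvLoopA, PySem.List.pyRange_one_eq_nil (by omega)]
    simp
  | succ fuel ih =>
    intro k m out hkeys hinv hfuel
    by_cases hc : ((pvAsc cs).map (fun ch => max (((cs.count ch : Nat) : Int) - k) 0)).sum = 0
    · -- count = 0: the while loop exits, and all rows from level k on are empty
      have hble : pvMB cs ≤ (k : Int) := by
        rcases (pvMB_spec cs).2 with h0 | ⟨ch, hch, hval⟩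
        · omega
        · have := pvSum_zero_bound (pvAsc cs) _ _ hc ch ((pvMem_asc cs ch).mpr hch)
          omega
      rw [pvLoopA, if_neg (by simpa using hc), PySem.List.pyRange_one_eq_nil hble]
      simp
    · -- count ≠ 0: one more pass, producing row k
      obtain ⟨chw, hchw, hkw⟩ := pvSum_ne_zero_exists _ _ _ hc
      have hlt : (k : Int) < pvMB cs := by
        have := (pvMB_spec cs).1 chw ((pvMem_asc cs chw).mp hchw)
        omega
      have horient : (if (if k % 2 = 0 then (1 : Int) else -1) = 1
            then PySem.List.sorted m.keys (fun c => c)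
            else (PySem.List.sorted m.keys (fun c => c)).reverse)
          = (if k % 2 = 0 then pvAsc cs else (pvAsc cs).reverse) := by
        rw [hkeys]
        by_cases hk2 : k % 2 = 0 <;> simp [hk2, pvAsc]
      have hnd : (if k % 2 = 0 then pvAsc cs else (pvAsc cs).reverse).Nodup := by
        by_cases hk2 : k % 2 = 0 <;> simp [hk2, pvAsc_nodup cs]
      obtain ⟨P1, P2, P3, P4⟩ := pvPass_spec _ hnd m out
        ((pvAsc cs).map (fun ch => max (((cs.count ch : Nat) : Int) - k) 0)).sum
      have hfil : (if k % 2 = 0 then pvAsc cs else (pvAsc cs).reverse).filter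
            (fun ch => decide (m.getD ch 0 ≠ 0))
          = (if k % 2 = 0 then pvAsc cs else (pvAsc cs).reverse).filter
            (fun ch => decide ((k : Int) < ((cs.count ch : Nat) : Int))) := by
        refine List.filter_congr fun x _ => ?_
        rw [hinv x]
        simp only [decide_eq_decide]
        omega
      have hrow : pvRow cs (k : Int)
          = (if k % 2 = 0 then pvAsc cs else (pvAsc cs).reverse).filter
            (fun ch => decide ((k : Int) < ((cs.count ch : Nat) : Int))) := by
        have hm2 : PySem.Int.mod (k : Int) 2 = ((k % 2 : Nat) : Int) := by
          exact_mod_cast PySem.Int.mod_natCast k 2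
        unfold pvRow
        rw [hm2]
        by_cases hk2 : k % 2 = 0
        · rw [hk2]
          norm_num [PySem.Dict.getD_counter]
        · have hk1 : k % 2 = 1 := by omega
          rw [hk1]
          norm_num [PySem.Dict.getD_counter, hk2]
      have hlen : ((if k % 2 = 0 then pvAsc cs else (pvAsc cs).reverse).filter
            (fun ch => decide ((k : Int) < ((cs.count ch : Nat) : Int)))).length
          = ((pvAsc cs).filter
            (fun ch => decide ((k : Int) < ((cs.count ch : Nat) : Int)))).length := by
        by_cases hk2 : k % 2 = 0 <;> simp [hk2, List.filter_reverse]
      rw [pvLoopA, if_pos (by simpa using hc)]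
      simp only [horient]
      have hstep : (-(if k % 2 = 0 then (1 : Int) else -1))
          = (if (k + 1) % 2 = 0 then (1 : Int) else -1) := by
        by_cases hk2 : k % 2 = 0
        · have : (k + 1) % 2 = 1 := by omega
          simp [hk2, this]
        · have : (k + 1) % 2 = 0 := by omega
          simp [hk2, this]
      rw [hstep, P4, hfil, hlen, pvSum_step, P1, hfil, ← hrow]
      have hcast : ((k : Int) + 1) = ((k + 1 : Nat) : Int) := by push_cast; ring
      rw [hcast]
      rw [ih (k + 1) _ _ (by rw [P3, hkeys]) ?_ (by omega)]
      · rw [PySem.List.pyRange_one_cons hlt, List.flatMap_cons, ← hcast, List.append_assoc]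
      · intro ch
        rw [P2 ch, hinv ch]
        by_cases hpos : (k : Int) < ((cs.count ch : Nat) : Int)
        · have hmem : ch ∈ (if k % 2 = 0 then pvAsc cs else (pvAsc cs).reverse) := by
            have : ch ∈ pvAsc cs := (pvMem_asc cs ch).mpr (List.count_pos_iff.mp (by omega))
            by_cases hk2 : k % 2 = 0 <;> simp [hk2, this]
          rw [if_pos ⟨hmem, by omega⟩]
          omega
        · rw [if_neg (by omega)]
          omega

-- A's result is the row-major zigzag list
theorem pvA_eq_rows (s : String) :
    sortString_hash s
      = String.ofList ((PySem.List.pyRange 0 (pvMB s.toList) 1).flatMap (pvRow s.toList)) := by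
  have hperm : (pvAsc s.toList).Perm (PySem.Set.ofList s.toList) := by
    rw [pvAsc, PySem.Dict.keys_counter]
    exact PySem.List.sorted_perm _ _ _
  have hsum : (PySem.Dict.counter s.toList).values.sum
      = ((pvAsc s.toList).map
          (fun ch => max (((s.toList.count ch : Nat) : Int) - ((0 : Nat) : Int)) 0)).sum := by
    rw [pvValues_counter]
    rw [(hperm.map (fun ch => max (((s.toList.count ch : Nat) : Int) - ((0 : Nat) : Int)) 0)).sum_eq]
    refine congrArg List.sum (List.map_congr_left fun ch _ => ?_)
    have : (0 : Int) ≤ ((s.toList.count ch : Nat) : Int) := by positivity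
    omega
  simp only [sortString_hash, pvBuildA_eq_counter]
  congr 1
  have h0 := pvLoopA_spec s.toList s.toList.length 0 (PySem.Dict.counter s.toList) []
    rfl
    (fun ch => by rw [PySem.Dict.getD_counter]; omega)
    (by
      rcases (pvMB_spec s.toList).2 with h0 | ⟨ch, _, hval⟩
      · omega
      · have := List.count_le_length (a := ch) (l := s.toList)
        omega)
  rw [hsum]
  norm_num at h0 ⊢
  exact h0

-- ===== B-side lemmas =====

-- keys of the same character with different occurrence indices differ (codes ≤ 127)
theorem pvKey_ne (j j' : Int) (c : Char) (hc : (c.toNat : Int) ≤ 127) (hne : j ≠ j') :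
    pvKey j c ≠ pvKey j' c := by
  have h0 : (0 : Int) ≤ (c.toNat : Int) := by positivity
  unfold pvKey
  by_cases h1 : PySem.Int.mod j 2 = 0 <;> by_cases h2 : PySem.Int.mod j' 2 = 0 <;>
    simp only [h1, h2, if_true, if_false, if_pos, if_neg] <;> omega

-- keys of a lower level are smaller than keys of a higher level (codes in [0, 127])
theorem pvKey_lt_of_level_lt (r r' : Int) (c c' : Char) (hr : 0 ≤ r)
    (hc : (c.toNat : Int) ≤ 127) (hc' : (c'.toNat : Int) ≤ 127) (hlt : r < r') :
    pvKey r c < pvKey r' c' := by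
  have h0 : (0 : Int) ≤ (c.toNat : Int) := by positivity
  have h0' : (0 : Int) ≤ (c'.toNat : Int) := by positivity
  unfold pvKey
  by_cases h1 : PySem.Int.mod r 2 = 0 <;> by_cases h2 : PySem.Int.mod r' 2 = 0 <;>
    simp only [h1, h2, if_true, if_false, if_pos, if_neg] <;> nlinarith

-- B's first loop builds pvKeyedFrom of the seen-so-far counts
theorem pvFoldB (cs : List Char) :
    ∀ (g : Char → Int) (d : PySem.Dict Char Int) (acc : List (Int × Char)),
      (∀ ch, d.getD ch 0 = g ch) →
      (cs.foldl
        (fun (p : PySem.Dict Char Int × List (Int × Char)) ch =>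
          let j := p.1.getD ch 0
          let o : Int := (ch.toNat : Int)
          (p.1.insert ch (j + 1),
           p.2 ++ [(j * 128 + (if PySem.Int.mod j 2 = 0 then o else 127 - o), ch)]))
        (d, acc)).2 = acc ++ pvKeyedFrom g cs := by
  induction cs with
  | nil => intro g d acc _; simp [pvKeyedFrom]
  | cons ch t ih =>
    intro g d acc hg
    rw [List.foldl_cons]
    have hstep := ih (fun c => if c = ch then g ch + 1 else g c)
      (d.insert ch (d.getD ch 0 + 1)) (acc ++ [(pvKey (g ch) ch, ch)])
      (fun c => by
        by_cases hc : c = ch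
        · subst hc; rw [PySem.Dict.getD_insert_self, hg]; simp
        · rw [PySem.Dict.getD_insert_of_ne _ _ _ hc]; simp [hg, hc])
    simp only [hg ch] at hstep ⊢
    rw [pvKeyedFrom]
    show (t.foldl _ (d.insert ch (g ch + 1), acc ++ [(pvKey (g ch) ch, ch)])).2 = _
    rw [hstep, List.append_assoc]
    rfl

-- membership in the keyed list: one entry per occurrence index
theorem pvMem_keyedFrom (cs : List Char) :
    ∀ (g : Char → Int) (k : Int) (c : Char),
      (k, c) ∈ pvKeyedFrom g cs
        ↔ ∃ j : Int, g c ≤ j ∧ j < g c + (cs.count c : Int) ∧ k = pvKey j c := by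
  induction cs with
  | nil =>
    intro g k c
    simp only [pvKeyedFrom, List.not_mem_nil, List.count_nil, false_iff, not_exists]
    intro j h1
    push_cast
    omega
  | cons ch t ih =>
    intro g k c
    rw [pvKeyedFrom, List.mem_cons, ih]
    by_cases hc : c = ch
    · subst hc
      simp only [eq_self_iff_true, if_true, List.count_cons_self]
      constructor
      · rintro (heq | ⟨j, h1, h2, rfl⟩)
        · rw [Prod.ext_iff] at heq
          obtain ⟨h, -⟩ := heq
          refine ⟨g c, le_refl _, ?_, h⟩
          push_cast
          omega
        · exact ⟨j, by omega, by push_cast at h2 ⊢; omega, rfl⟩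
      · rintro ⟨j, h1, h2, rfl⟩
        push_cast at h2
        by_cases hj : j = g c
        · subst hj
          exact Or.inl rfl
        · exact Or.inr ⟨j, by omega, by push_cast; omega, rfl⟩
    · rw [List.count_cons_of_ne (Ne.symm hc)]
      simp only [hc, if_false, Prod.mk.injEq]
      constructor
      · rintro (⟨-, h⟩ | h)
        · exact h.elim
        · exact h
      · exact Or.inr

-- the keyed list has no duplicate entries (codes ≤ 127)
theorem pvKeyedFrom_nodup (cs : List Char) (hdom : ∀ c ∈ cs, (c.toNat : Int) ≤ 127) :
    ∀ (g : Char → Int), (pvKeyedFrom g cs).Nodup := by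
  induction cs with
  | nil => intro g; simp [pvKeyedFrom]
  | cons ch t ih =>
    intro g
    rw [pvKeyedFrom, List.nodup_cons]
    refine ⟨?_, ih (fun c hc => hdom c (List.mem_cons_of_mem ch hc)) _⟩
    intro hmem
    obtain ⟨j, h1, _, hkey⟩ := (pvMem_keyedFrom t _ _ _).mp hmem
    rw [if_pos rfl] at h1
    exact pvKey_ne (g ch) j ch (hdom ch (List.mem_cons_self)) (by omega) hkey

-- membership in a row: counted characters below their count
theorem pvMem_row (cs : List Char) (r : Int) (c : Char) :
    c ∈ pvRow cs r ↔ c ∈ cs ∧ r < (cs.count c : Int) := by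
  unfold pvRow
  by_cases h2 : PySem.Int.mod r 2 = 0
  · rw [if_pos h2, List.mem_filter]
    simp [pvMem_asc, PySem.Dict.getD_counter, and_comm]
  · rw [if_neg h2, List.mem_filter, List.mem_reverse]
    simp [pvMem_asc, PySem.Dict.getD_counter, and_comm]

-- membership in the target: same characterisation as the keyed list with g = 0
theorem pvMem_target (cs : List Char) (k : Int) (c : Char) :
    (k, c) ∈ pvTarget cs ↔ ∃ j : Int, 0 ≤ j ∧ j < (cs.count c : Int) ∧ k = pvKey j c := by
  unfold pvTarget
  rw [List.mem_flatMap]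
  constructor
  · rintro ⟨r, hr, hmem⟩
    obtain ⟨c', hc', heq⟩ := List.mem_map.mp hmem
    obtain ⟨rfl, rfl⟩ : pvKey r c' = k ∧ c' = c := by
      exact ⟨congrArg Prod.fst heq, congrArg Prod.snd heq⟩
    rw [PySem.List.mem_pyRange_one] at hr
    obtain ⟨_, hcnt⟩ := (pvMem_row cs r c').mp hc'
    exact ⟨r, hr.1, hcnt, rfl⟩
  · rintro ⟨j, h0, hj, rfl⟩
    have hmemc : c ∈ cs := List.count_pos_iff.mp (by omega)
    refine ⟨j, ?_, List.mem_map.mpr ⟨c, (pvMem_row cs j c).mpr ⟨hmemc, hj⟩, rfl⟩⟩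
    rw [PySem.List.mem_pyRange_one]
    exact ⟨h0, lt_of_lt_of_le hj ((pvMB_spec cs).1 c hmemc)⟩

-- Char order is code order
theorem pvChar_lt (a b : Char) : a < b ↔ (a.toNat : Int) < (b.toNat : Int) := by
  constructor
  · intro h
    have := (Char.lt_def.mp h)
    exact_mod_cast UInt32.lt_iff_toNat_lt.mp this
  · intro h
    exact Char.lt_def.mpr (UInt32.lt_iff_toNat_lt.mpr (by exact_mod_cast h))

-- the target's keys are strictly increasing
theorem pvTarget_pairwise (cs : List Char) (hdom : ∀ c ∈ cs, (c.toNat : Int) ≤ 127) :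
    (pvTarget cs).Pairwise (fun a b => a.1 < b.1) := by
  unfold pvTarget
  rw [List.pairwise_flatMap]
  constructor
  · -- within a row: key monotone in the character (same level)
    intro r hr
    rw [PySem.List.mem_pyRange_one] at hr
    rw [List.pairwise_map]
    have hasc : (pvAsc cs).Pairwise (· < ·) := by
      rw [pvAsc, PySem.Dict.keys_counter]
      exact PySem.List.sorted_ofList_pairwise_lt cs
    unfold pvRow pvKey
    by_cases h2 : PySem.Int.mod r 2 = 0
    · rw [if_pos h2]
      refine (hasc.filter _).imp ?_
      intro a b hab
      simp only [h2, if_true]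
      have := (pvChar_lt a b).mp hab
      omega
    · rw [if_neg h2]
      have hdesc : ((pvAsc cs).reverse).Pairwise (fun a b : Char => b < a) :=
        List.pairwise_reverse.mpr hasc
      refine (hdesc.filter _).imp ?_
      intro a b hab
      simp only [h2, if_false]
      have := (pvChar_lt b a).mp hab
      omega
  · -- across rows: lower level's keys are smaller
    refine (PySem.List.pairwise_lt_pyRange_one 0 (pvMB cs)).imp_of_mem ?_
    intro r r' hr hr' hlt p hp q hq
    rw [PySem.List.mem_pyRange_one] at hr
    obtain ⟨a, ha, rfl⟩ := List.mem_map.mp hp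
    obtain ⟨b, hb, rfl⟩ := List.mem_map.mp hq
    exact pvKey_lt_of_level_lt r r' a b hr.1
      (hdom a ((pvMem_row cs r a).mp ha).1) (hdom b ((pvMem_row cs r' b).mp hb).1) hlt

-- ===== VERDICT (by name: the statement is the Claim_ definition above) =====
theorem sortString_hash_spec : Claim_equal_sortString_hash := by
  intro s hdom
  show sortString_hash s = sortString_hash_alt s
  have hdom' : ∀ c ∈ s.toList, (c.toNat : Int) ≤ 127 := by
    intro c hc
    have := List.all_eq_true.mp hdom c hc
    simp only [pvDomChar, Bool.or_eq_true, Bool.and_eq_true, decide_eq_true_eq, beq_iff_eq] at this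
    omega
  -- B's keyed list
  have hkeyed : (s.toList.foldl
        (fun (p : PySem.Dict Char Int × List (Int × Char)) ch =>
          let j := p.1.getD ch 0
          let o : Int := (ch.toNat : Int)
          (p.1.insert ch (j + 1),
           p.2 ++ [(j * 128 + (if PySem.Int.mod j 2 = 0 then o else 127 - o), ch)]))
        (PySem.Dict.empty, [])).2 = pvKeyedFrom (fun _ => 0) s.toList := by
    rw [pvFoldB s.toList (fun _ => 0) PySem.Dict.empty []
      (fun ch => PySem.Dict.getD_empty ch 0)]
    rfl
  -- the target is a permutation of the keyed list
  have hperm : (pvTarget s.toList).Perm (pvKeyedFrom (fun _ => 0) s.toList) := by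
    have hnd1 : (pvTarget s.toList).Nodup :=
      (pvTarget_pairwise s.toList hdom').imp (fun {a b} h he => by subst he; exact lt_irrefl _ h)
    have hnd2 := pvKeyedFrom_nodup s.toList hdom' (fun _ => 0)
    rw [List.perm_ext_iff_of_nodup hnd1 hnd2]
    rintro ⟨k, c⟩
    rw [pvMem_target, pvMem_keyedFrom]
    simp
  have hsorted : PySem.List.sorted (pvKeyedFrom (fun _ => 0) s.toList)
        (fun e : Int × Char => e.1) = pvTarget s.toList :=
    PySem.List.sorted_eq_of_perm_of_pairwise_lt _ _ _ hperm (pvTarget_pairwise s.toList hdom')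
  rw [pvA_eq_rows]
  show _ = String.ofList ((PySem.List.sorted _ (fun e : Int × Char => e.1)).map (fun e => e.2))
  rw [hkeyed, hsorted]
  congr 1
  unfold pvTarget
  rw [List.map_flatMap]
  have hmaps : ∀ r : Int, ((pvRow s.toList r).map (fun c => (pvKey r c, c))).map
      (fun e : Int × Char => e.2) = pvRow s.toList r := by
    intro r
    simp [Function.comp_def]
  exact List.flatMap_congr (fun r _ => (hmaps r).symm)
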